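-- pv_equiv track=rewrite | github.com/arikost/YanivCardGame | flask-server/server.py | check_for_pairs
-- ===== SOURCE A (Python) =====
-- def get_sum(cards_set):
--     cards_sum = 0
--     for card in cards_set:
--         cards_sum += int(card[:2])
--     return cards_sum
--
-- def check_for_pairs(player_hand):
--     pair1 = set()
--     pair2 = set()
--     for i in range(len(player_hand)-1):
--         if player_hand[i][:2] == player_hand[i+1][:2]:
--             if len(pair1) == 0:
--                 pair1.add(player_hand[i])
--                 pair1.add(player_hand[i+1])
--             elif player_hand[i] in pair1:
--                 pair1.add(player_hand[i+1])
--             else: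
--                 pair2.add(player_hand[i])
--                 pair2.add(player_hand[i+1])
--
--     if get_sum(pair1) >= get_sum(pair2):
--         return pair1
--     else:
--         return pair2
-- ===== SOURCE B (Python) =====
-- def get_sum(cards_set):
--     return sum(int(card[:2]) for card in cards_set)
--
--
-- def check_for_pairs(player_hand):
--     # Build the consecutive equal-rank runs, then pick: pair1 = first run of
--     # length >= 2, pair2 = union of all later runs of length >= 2.
--     runs = []
--     cur = []
--     for card in player_hand:
--         if cur and cur[-1][:2] == card[:2]:
--             cur.append(card)
--         else:
--             if len(cur) >= 2:
--                 runs.append(cur)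
--             cur = [card]
--     if len(cur) >= 2:
--         runs.append(cur)
--     pair1 = set(runs[0]) if runs else set()
--     pair2 = {c for r in runs[1:] for c in r}
--     return pair1 if get_sum(pair1) >= get_sum(pair2) else pair2
-- ===== Notes on version B (the rewrite author's own statement) =====
-- stated objective: idiomatic
-- what changed: Replaces the single adjacency walk that grows two sets by card-membership tests with an explicit group-building pass (consecutive equal-rank runs) followed by group selection: pair1 = first run of length >= 2, pair2 = union of the later qualifying runs.
-- outside the precondition, e.g. on check_for_pairs(['07a', '07b', '05x', '07a', '07c']): A returns {'07a', '07b', '07c'}, B returns {'07a', '07b'}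
import Mathlib
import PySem

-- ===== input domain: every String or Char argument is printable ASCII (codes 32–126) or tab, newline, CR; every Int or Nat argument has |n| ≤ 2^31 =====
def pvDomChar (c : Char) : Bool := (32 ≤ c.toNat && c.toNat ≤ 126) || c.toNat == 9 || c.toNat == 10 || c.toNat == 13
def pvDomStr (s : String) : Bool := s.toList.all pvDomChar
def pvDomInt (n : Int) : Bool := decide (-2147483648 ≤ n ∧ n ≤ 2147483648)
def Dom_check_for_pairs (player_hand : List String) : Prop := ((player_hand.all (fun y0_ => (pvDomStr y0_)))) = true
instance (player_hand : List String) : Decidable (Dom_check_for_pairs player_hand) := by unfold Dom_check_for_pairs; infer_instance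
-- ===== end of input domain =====

-- B groups the hand into consecutive equal-rank runs and selects among them,
-- instead of A's adjacency walk growing two sets by membership tests (objective: idiomatic).

-- ===== PORT A =====
-- card[:2], the rank prefix
def cfpKey (card : String) : String := PySem.Str.slice card none (some 2)

-- get_sum: int(card[:2]) summed; .getD 0 is never reached under Pre_ (every summed
-- card sits in an adjacent equal-rank pair, whose rank Pre_ requires to parse)
def get_sum (cards_set : List String) : Int :=
  cards_set.foldl (fun cards_sum card => cards_sum + (PySem.Int.ofStr? (cfpKey card)).getD 0) 0

-- the loop 'for i in range(len(player_hand)-1)' reads player_hand[i], player_hand[i+1];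
-- ported as the structural recursion over adjacent elements carrying the same (pair1, pair2) state
def cfpLoopA (pair1 pair2 : PySem.Set String) : List String → PySem.Set String × PySem.Set String
  | a :: b :: rest =>
    if cfpKey a = cfpKey b then
      if pair1.length = 0 then
        cfpLoopA (PySem.Set.add (PySem.Set.add pair1 a) b) pair2 (b :: rest)
      else if PySem.Set.contains pair1 a then
        cfpLoopA (PySem.Set.add pair1 b) pair2 (b :: rest)
      else
        cfpLoopA pair1 (PySem.Set.add (PySem.Set.add pair2 a) b) (b :: rest)
    else
      cfpLoopA pair1 pair2 (b :: rest)
  | _ => (pair1, pair2)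

def check_for_pairs (player_hand : List String) : List String :=
  let st := cfpLoopA PySem.Set.empty PySem.Set.empty player_hand
  if get_sum st.1 ≥ get_sum st.2 then st.1 else st.2

-- ===== PORT B =====
-- sum(int(card[:2]) for card in cards_set)
def cfpSumB (cards_set : List String) : Int :=
  (cards_set.map (fun card => (PySem.Int.ofStr? (cfpKey card)).getD 0)).sum

-- the run-building loop: runs/cur as in Source B; cur[-1] via pyGetD (read only when cur ≠ [])
def cfpRuns (runs : List (List String)) (cur : List String) : List String → List (List String)
  | [] => if 2 ≤ cur.length then runs ++ [cur] else runs
  | card :: rest =>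
    if cur ≠ [] ∧ cfpKey (PySem.List.pyGetD cur (-1) "") = cfpKey card then
      cfpRuns runs (cur ++ [card]) rest
    else
      cfpRuns (if 2 ≤ cur.length then runs ++ [cur] else runs) [card] rest

def check_for_pairs_alt (player_hand : List String) : List String :=
  let runs := cfpRuns [] [] player_hand
  let pair1 : PySem.Set String := match runs with
    | [] => PySem.Set.empty
    | r :: _ => PySem.Set.ofList r
  let pair2 : PySem.Set String := PySem.Set.ofList (runs.drop 1).flatten
  if cfpSumB pair1 ≥ cfpSumB pair2 then pair1 else pair2

-- ===== PRECONDITION & SPEC =====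
-- Pre_ excludes (a) hands on which A raises ValueError (a card in an adjacent equal-rank
-- pair whose rank prefix int() rejects), and (b) hands holding the same card string twice,
-- on which A's membership test can merge a later run into pair1 — a defensible corner
-- (a real hand has distinct cards) where B's run-grouping value is equally defensible.
def Pre_check_for_pairs (player_hand : List String) : Prop :=
  player_hand.Nodup ∧
  ∀ p ∈ player_hand.zip player_hand.tail,
    cfpKey p.1 = cfpKey p.2 → (PySem.Int.ofStr? (cfpKey p.1)).isSome
instance (player_hand : List String) : Decidable (Pre_check_for_pairs player_hand) := by
  unfold Pre_check_for_pairs; infer_instance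

def pvWitness_check_for_pairs : List String := ["05H", "05D", "03S"]

def Spec_check_for_pairs (player_hand : List String) (out : List String) : Prop := out = check_for_pairs_alt player_hand
instance (player_hand : List String) (out : List String) : Decidable (Spec_check_for_pairs player_hand out) := by unfold Spec_check_for_pairs; infer_instance

-- ===== CLAIM (what is proved, stated in full; the proofs are below) =====
def Claim_equal_check_for_pairs : Prop := ∀ (player_hand : List String), Dom_check_for_pairs player_hand → Pre_check_for_pairs player_hand → Spec_check_for_pairs player_hand (check_for_pairs player_hand)

-- ===== LEMMAS AND PROOFS =====

-- the qualifying runs once the open run cur is closed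
def cfpQ (R : List (List String)) (cur : List String) : List (List String) :=
  if 2 ≤ cur.length then R ++ [cur] else R

-- A's pair1 / pair2 as read off a runs list
def cfpP1 : List (List String) → List String
  | [] => []
  | r :: _ => r

def cfpP2 (Q : List (List String)) : List String := (Q.drop 1).flatten

lemma cfpRuns_flatten_sublist (l : List String) : ∀ (R : List (List String)) (cur : List String),
    (cfpRuns R cur l).flatten.Sublist (R.flatten ++ cur ++ l) := by
  induction l with
  | nil =>
    intro R cur
    simp only [cfpRuns]
    split
    · simp
    · exact (List.sublist_append_left R.flatten cur).trans (List.sublist_append_left _ _)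
  | cons b l ih =>
    intro R cur
    simp only [cfpRuns]
    split
    · have h := ih R (cur ++ [b])
      simpa [List.append_assoc] using h
    · split
      · have h := ih (R ++ [cur]) [b]
        simp only [List.flatten_append, List.flatten_cons, List.flatten_nil, List.append_nil] at h
        refine h.trans ?_
        simp only [List.append_assoc, List.singleton_append]
        exact List.Sublist.refl _
      · have h := ih R [b]
        refine h.trans ?_
        have h2 : (R.flatten ++ ([b] ++ l)).Sublist (R.flatten ++ (cur ++ ([b] ++ l))) :=
          List.Sublist.append_left (List.sublist_append_right cur _) R.flatten
        simpa [List.append_assoc] using h2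

-- Core bisimulation: A's walk, started from the state read off (R, cur), computes the
-- state read off the final runs list.
lemma cfpLoopA_eq (l : List String) : ∀ (R : List (List String)) (cur : List String) (a : String),
    cur.getLast? = some a →
    (R.flatten ++ cur ++ l).Nodup →
    (∀ r ∈ R, 2 ≤ r.length) →
    cfpLoopA (cfpP1 (cfpQ R cur)) (cfpP2 (cfpQ R cur)) (a :: l)
      = (cfpP1 (cfpRuns R cur l), cfpP2 (cfpRuns R cur l)) := by
  induction l with
  | nil =>
    intro R cur a _ _ _
    simp only [cfpRuns, cfpQ, cfpLoopA]
  | cons b l ih =>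
    intro R cur a hlast hnd hR
    have hcur : cur ≠ [] := by rintro rfl; simp at hlast
    have hlastE : cur.getLast hcur = a := by
      rw [List.getLast?_eq_some_getLast hcur] at hlast
      exact Option.some.inj hlast
    have hae : a ∈ cur := List.mem_of_getLast? hlast
    have hgetD : PySem.List.pyGetD cur (-1) "" = a := by
      rw [PySem.List.pyGetD_neg_one cur "" hcur, hlastE]
    -- pieces of the nodup hypothesis
    have hndL : (R.flatten ++ cur).Nodup := ((List.sublist_append_left _ _).nodup hnd)
    have hndR : (cur ++ b :: l).Nodup := by
      have : (cur ++ b :: l).Sublist (R.flatten ++ (cur ++ b :: l)) :=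
        List.sublist_append_right _ _
      exact this.nodup (by simpa [List.append_assoc] using hnd)
    have hdisj : ∀ x ∈ R.flatten ++ cur, x ∉ b :: l := by
      intro x hx hxl
      have h := hnd
      rw [List.nodup_append] at h
      exact h.2.2 x hx x hxl rfl
    have hbcur : b ∉ cur := by
      rw [List.nodup_append] at hndR
      exact fun hb => hndR.2.2 b hb b (by simp) rfl
    have hdisjRc : ∀ x ∈ R.flatten, x ∉ cur := by
      rw [List.nodup_append] at hndL
      exact fun x hx hxc => hndL.2.2 x hx x hxc rfl
    by_cases hk : cfpKey a = cfpKey b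
    · -- equal ranks: B appends b to the open run
      have hruns : cfpRuns R cur (b :: l) = cfpRuns R (cur ++ [b]) l := by
        rw [cfpRuns]
        rw [if_pos ⟨hcur, by rw [hgetD]; exact hk⟩]
      have hlast' : (cur ++ [b]).getLast? = some b := by simp
      have hnd' : (R.flatten ++ (cur ++ [b]) ++ l).Nodup := by
        simpa [List.append_assoc] using hnd
      by_cases h2 : 2 ≤ cur.length
      · rcases R with _ | ⟨q, R'⟩
        · -- first run still open: pair1 = cur, grows to cur ++ [b]
          have hP1 : cfpP1 (cfpQ [] cur) = cur := by simp [cfpQ, h2, cfpP1]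
          have hP2 : cfpP2 (cfpQ [] cur) = [] := by simp [cfpQ, h2, cfpP2]
          rw [hP1, hP2, cfpLoopA]
          rw [if_pos hk, if_neg (by simp [hcur]),
              if_pos (by simpa [PySem.Set.contains_iff] using hae)]
          rw [PySem.Set.add_of_not_mem hbcur, hruns]
          have := ih [] (cur ++ [b]) b hlast' (by simpa using hnd') (by simp)
          have hq' : cfpQ [] (cur ++ [b]) = [cur ++ [b]] := by
            rw [cfpQ, if_pos (by simp; omega)]; simp
          rwa [hq', show cfpP1 [cur ++ [b]] = cur ++ [b] from rfl,
              show cfpP2 [cur ++ [b]] = [] by simp [cfpP2]] at this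
        · -- pair1 closed earlier: a, b go to pair2 (cur already there)
          have hq2 : 2 ≤ q.length := hR q (by simp)
          have hP1 : cfpP1 (cfpQ (q :: R') cur) = q := by
            simp [cfpQ, h2, cfpP1]
          have hP2 : cfpP2 (cfpQ (q :: R') cur) = R'.flatten ++ cur := by
            simp [cfpQ, h2, cfpP2]
          have haq : a ∉ q := by
            intro h
            exact hdisjRc a (by simp [h]) hae
          have hap2 : a ∈ R'.flatten ++ cur := by simp [hae]
          have hbp2 : b ∉ R'.flatten ++ cur := by
            intro h
            rcases List.mem_append.mp h with h | h
            · exact hdisj b (by simp [h]) (by simp)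
            · exact hbcur h
          rw [hP1, hP2, cfpLoopA]
          rw [if_pos hk, if_neg (by omega),
              if_neg (by simpa [PySem.Set.contains_iff] using haq)]
          rw [PySem.Set.add_of_mem hap2, PySem.Set.add_of_not_mem hbp2, hruns]
          have := ih (q :: R') (cur ++ [b]) b hlast' hnd' hR
          have hq' : cfpQ (q :: R') (cur ++ [b]) = q :: (R' ++ [cur ++ [b]]) := by
            rw [cfpQ, if_pos (by simp; omega)]; simp
          rwa [hq', show cfpP1 (q :: (R' ++ [cur ++ [b]])) = q from rfl,
              show cfpP2 (q :: (R' ++ [cur ++ [b]])) = (R'.flatten ++ cur) ++ [b] by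
                simp [cfpP2]] at this
      · -- open run is the single card a
        have hcur1 : cur = [a] := by
          have hp : 1 ≤ cur.length := List.length_pos_of_ne_nil hcur
          rcases List.length_eq_one_iff.mp (show cur.length = 1 by omega) with ⟨x, rfl⟩
          simp at hlastE
          rw [hlastE]
        subst hcur1
        have hab : a ≠ b := by
          intro h; exact hbcur (by simp [h])
        rcases R with _ | ⟨q, R'⟩
        · -- nothing seen yet: start pair1 = {a, b}
          have hP1 : cfpP1 (cfpQ [] [a]) = [] := by simp [cfpQ, cfpP1]
          have hP2 : cfpP2 (cfpQ [] [a]) = [] := by simp [cfpQ, cfpP2]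
          rw [hP1, hP2, cfpLoopA]
          rw [if_pos hk, if_pos (by simp)]
          have hadd : (PySem.Set.add ([] : List String) a).add b = [a, b] := by
            rw [show PySem.Set.add ([] : List String) a = [a] from rfl,
                PySem.Set.add_of_not_mem (by simpa using hab.symm)]
            rfl
          rw [hadd, hruns]
          have := ih [] [a, b] b (by simp) (by simpa using hnd') (by simp)
          rwa [show cfpP1 (cfpQ [] [a, b]) = [a, b] by simp [cfpQ, cfpP1],
              show cfpP2 (cfpQ [] [a, b]) = [] by simp [cfpQ, cfpP2]] at this
        · -- pair1 closed earlier: a, b both join pair2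
          have hq2 : 2 ≤ q.length := hR q (by simp)
          have hP1 : cfpP1 (cfpQ (q :: R') [a]) = q := by simp [cfpQ, cfpP1]
          have hP2 : cfpP2 (cfpQ (q :: R') [a]) = R'.flatten := by simp [cfpQ, cfpP2]
          have haq : a ∉ q := by
            intro h
            exact hdisjRc a (by simp [h]) hae
          have hap2 : a ∉ R'.flatten := by
            intro h
            exact hdisjRc a (by simp [h]) hae
          have hbp2 : b ∉ R'.flatten ++ [a] := by
            intro h
            rcases List.mem_append.mp h with h | h
            · exact hdisj b (by simp [h]) (by simp)
            · have hba : b = a := by simpa using h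
              exact hab hba.symm
          rw [hP1, hP2, cfpLoopA]
          rw [if_pos hk, if_neg (by omega),
              if_neg (by simpa [PySem.Set.contains_iff] using haq)]
          rw [PySem.Set.add_of_not_mem hap2, PySem.Set.add_of_not_mem hbp2, hruns]
          have := ih (q :: R') [a, b] b (by simp) (by simpa using hnd') hR
          rwa [show cfpP1 (cfpQ (q :: R') [a, b]) = q by simp [cfpQ, cfpP1],
              show cfpP2 (cfpQ (q :: R') [a, b]) = R'.flatten ++ [a] ++ [b] by
                simp [cfpQ, cfpP2]] at this
    · -- rank changes: A keeps its state, B closes the run and opens [b]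
      have hruns : cfpRuns R cur (b :: l)
          = cfpRuns (if 2 ≤ cur.length then R ++ [cur] else R) [b] l := by
        rw [cfpRuns]
        rw [if_neg (by rintro ⟨-, h⟩; rw [hgetD] at h; exact hk h)]
      have hQeq : cfpQ (if 2 ≤ cur.length then R ++ [cur] else R) [b] = cfpQ R cur := by
        simp [cfpQ]
      rw [cfpLoopA, if_neg hk, hruns]
      have hnd2 : ((if 2 ≤ cur.length then R ++ [cur] else R).flatten ++ [b] ++ l).Nodup := by
        split
        · simpa [List.append_assoc] using hnd
        · have hsub : (R.flatten ++ [b] ++ l).Sublist (R.flatten ++ cur ++ (b :: l)) := by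
            have h3 : (R.flatten ++ ([b] ++ l)).Sublist (R.flatten ++ (cur ++ ([b] ++ l))) :=
              List.Sublist.append_left (List.sublist_append_right cur _) R.flatten
            simpa [List.append_assoc] using h3
          exact hsub.nodup hnd
      have hR2 : ∀ r ∈ (if 2 ≤ cur.length then R ++ [cur] else R), 2 ≤ r.length := by
        split
        · intro r hr
          rcases List.mem_append.mp hr with h | h
          · exact hR r h
          · simp at h; subst h; omega
        · exact hR
      have := ih (if 2 ≤ cur.length then R ++ [cur] else R) [b] b (by simp) hnd2 hR2
      rwa [hQeq] at this

lemma get_sum_eq (xs : List String) : get_sum xs = cfpSumB xs := by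
  rw [get_sum, cfpSumB, PySem.List.foldl_add, zero_add]

theorem check_for_pairs_spec : Claim_equal_check_for_pairs := by
  unfold Claim_equal_check_for_pairs
  intro hand _ hpre
  unfold Spec_check_for_pairs check_for_pairs check_for_pairs_alt
  obtain ⟨hnd, -⟩ := hpre
  cases hand with
  | nil => rfl
  | cons a l =>
    have hstep : cfpRuns ([] : List (List String)) [] (a :: l) = cfpRuns [] [a] l := by
      rw [cfpRuns, if_neg (by simp)]
      simp
    have hmain := cfpLoopA_eq l [] [a] a (by simp) (by simpa using hnd) (by simp)
    rw [show cfpQ ([] : List (List String)) [a] = [] by rw [cfpQ, if_neg (by simp)],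
        show cfpP1 ([] : List (List String)) = [] from rfl,
        show cfpP2 ([] : List (List String)) = [] from rfl] at hmain
    have hndr : (cfpRuns ([] : List (List String)) [a] l).flatten.Nodup := by
      have hsub := cfpRuns_flatten_sublist l [] [a]
      exact hsub.nodup (by simpa using hnd)
    rw [hstep]
    show (if get_sum (cfpLoopA [] [] (a :: l)).1 ≥ get_sum (cfpLoopA [] [] (a :: l)).2
            then (cfpLoopA [] [] (a :: l)).1 else (cfpLoopA [] [] (a :: l)).2) = _
    rw [hmain]
    cases hruns : cfpRuns ([] : List (List String)) [a] l with
    | nil => rfl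
    | cons r rs =>
      rw [hruns] at hndr
      simp only [List.flatten_cons, List.nodup_append] at hndr
      have h1 : PySem.Set.ofList r = r := PySem.Set.ofList_eq_self_of_nodup r hndr.1
      have h2 : PySem.Set.ofList ((r :: rs).drop 1).flatten = rs.flatten := by
        simpa using PySem.Set.ofList_eq_self_of_nodup rs.flatten hndr.2.1
      show _ = (if cfpSumB (PySem.Set.ofList r) ≥ cfpSumB (PySem.Set.ofList ((r :: rs).drop 1).flatten)
            then PySem.Set.ofList r else PySem.Set.ofList ((r :: rs).drop 1).flatten)
      rw [h1, h2, show cfpP1 (r :: rs) = r from rfl, show cfpP2 (r :: rs) = rs.flatten by simp [cfpP2],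
        get_sum_eq, get_sum_eq]
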